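-- pv_equiv track=rewrite | github.com/NaNameUz3r/Survivor_-_28_tasks- | task_25/transform_transform.py | transform
-- ===== SOURCE A (Python) =====
-- def transform(numbers_to_transform):
--
--     back_keys = []
--     for outer_index in range(0, len(numbers_to_transform)):
--         for inner_index in range(0, len(numbers_to_transform) - outer_index):
--             coefficient = outer_index + inner_index
--             major_number = 0
--             for find_max in range(inner_index, coefficient + 1):
--                 if major_number <= numbers_to_transform[find_max]:
--                     major_number = numbers_to_transform[find_max]
--             back_keys.append(major_number)
--     coefficient = "error"
--     major_number = "error"
--     return back_keys
-- ===== SOURCE B (Python) =====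
-- def transform(numbers_to_transform):
--     # One pass of running prefix maxima per start (O(n^2)), then gather by window length.
--     rows = []
--     for start in range(len(numbers_to_transform)):
--         running = 0
--         row = []
--         for value in numbers_to_transform[start:]:
--             if running < value:
--                 running = value
--             row.append(running)
--         rows.append(row)
--     out = []
--     for length in range(len(numbers_to_transform)):
--         for row in rows:
--             if length < len(row):
--                 out.append(row[length])
--     return out
-- ===== Notes on version B (the rewrite author's own statement) =====
-- stated objective: faster
-- what changed: Replaces the triple loop (recomputing each window max from scratch) by one running prefix-maximum row per start position, then gathers the answers by window length from those rows.
import Mathlib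
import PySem

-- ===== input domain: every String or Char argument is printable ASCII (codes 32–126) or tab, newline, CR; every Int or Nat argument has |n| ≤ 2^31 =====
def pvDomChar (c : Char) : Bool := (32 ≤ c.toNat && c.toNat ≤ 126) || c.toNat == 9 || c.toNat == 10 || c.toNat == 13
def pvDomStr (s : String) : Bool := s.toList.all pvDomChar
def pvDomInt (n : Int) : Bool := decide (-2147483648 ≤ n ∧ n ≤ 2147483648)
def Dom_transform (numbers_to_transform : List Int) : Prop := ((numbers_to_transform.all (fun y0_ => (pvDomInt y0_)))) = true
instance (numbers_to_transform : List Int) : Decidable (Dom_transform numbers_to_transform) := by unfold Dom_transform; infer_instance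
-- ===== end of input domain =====

-- B replaces A's triple loop by one running prefix-maximum row per start plus a gather by
-- window length (O(n^2) instead of O(n^3)); measured faster on the timing inputs.

-- ===== PORT A =====
def transform (numbers_to_transform : List Int) : List Int :=
  (PySem.List.pyRange 0 numbers_to_transform.length 1).foldl (fun back_keys outer_index =>
    (PySem.List.pyRange 0 ((numbers_to_transform.length : Int) - outer_index) 1).foldl
      (fun bk inner_index =>
        let coefficient := outer_index + inner_index
        let major_number := (PySem.List.pyRange inner_index (coefficient + 1) 1).foldl
          (fun major_number find_max =>
            if major_number ≤ PySem.List.pyGetD numbers_to_transform find_max 0 then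
              PySem.List.pyGetD numbers_to_transform find_max 0
            else major_number) 0
        bk ++ [major_number]) back_keys) []

-- ===== PORT B =====
def transform_alt (numbers_to_transform : List Int) : List Int :=
  let rows : List (List Int) :=
    (PySem.List.pyRange 0 numbers_to_transform.length 1).foldl (fun rows start =>
      let row := ((PySem.List.slice numbers_to_transform (some start) none).foldl
        (fun (st : Int × List Int) value =>
          let r := if st.1 < value then value else st.1
          (r, st.2 ++ [r])) (0, ([] : List Int))).2
      rows ++ [row]) []
  (PySem.List.pyRange 0 numbers_to_transform.length 1).foldl (fun out length =>
    rows.foldl (fun out2 row =>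
      if length < (row.length : Int) then out2 ++ [PySem.List.pyGetD row length 0] else out2)
      out) []

-- ===== PRECONDITION & SPEC =====
def Spec_transform (numbers_to_transform : List Int) (out : List Int) : Prop := out = transform_alt numbers_to_transform
instance (numbers_to_transform : List Int) (out : List Int) : Decidable (Spec_transform numbers_to_transform out) := by unfold Spec_transform; infer_instance

-- ===== CLAIM (what is proved, stated in full; the proofs are below) =====
def Claim_equal_transform : Prop := ∀ (numbers_to_transform : List Int), Dom_transform numbers_to_transform → Spec_transform numbers_to_transform (transform numbers_to_transform)

-- ===== LEMMAS AND PROOFS =====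

-- window max with initial value 0, over xs[s .. s+l]
def pvW (xs : List Int) (s l : Nat) : Int := ((xs.drop s).take (l + 1)).foldl max 0

-- the canonical result both programs compute
def pvC (xs : List Int) : List Int :=
  (List.range xs.length).flatMap (fun o => (List.range (xs.length - o)).map (fun s => pvW xs s o))

-- running prefix maxima
def pvRmx : List Int → Int → List Int
  | [], _ => []
  | v :: t, m => max m v :: pvRmx t (max m v)

theorem pvRmx_length (ys : List Int) : ∀ m, (pvRmx ys m).length = ys.length := by
  induction ys with
  | nil => intro m; rfl
  | cons v t ih => intro m; simp [pvRmx, ih]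

theorem pvRmx_getElem (ys : List Int) : ∀ (m : Int) (l : Nat) (h : l < ys.length),
    (pvRmx ys m)[l]'(by rw [pvRmx_length]; exact h) = (ys.take (l + 1)).foldl max m := by
  induction ys with
  | nil => intro m l h; simp at h
  | cons v t ih =>
    intro m l h
    cases l with
    | zero => simp [pvRmx]
    | succ k =>
      have hk : k < t.length := by simpa using h
      simpa [pvRmx, List.foldl] using ih (max m v) k hk

-- Source B's inner loop computes (running max, acc ++ running prefix maxima)
theorem pvFold_rmx (ys : List Int) : ∀ (m : Int) (acc : List Int),
    (ys.foldl (fun (st : Int × List Int) value =>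
      let r := if st.1 < value then value else st.1
      (r, st.2 ++ [r])) (m, acc)) = (ys.foldl max m, acc ++ pvRmx ys m) := by
  induction ys with
  | nil => intro m acc; simp [pvRmx]
  | cons v t ih =>
    intro m acc
    have hmax : (if m < v then v else m) = max m v := by omega
    simp only [List.foldl, hmax, ih, pvRmx, List.append_assoc, List.singleton_append]

-- A, with the local `let`s zeta-reduced (definitional unfolding only)
theorem pvA_shape (xs : List Int) : transform xs =
    (PySem.List.pyRange 0 xs.length 1).foldl (fun back_keys outer_index =>
      (PySem.List.pyRange 0 ((xs.length : Int) - outer_index) 1).foldl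
        (fun bk inner_index =>
          bk ++ [(PySem.List.pyRange inner_index (outer_index + inner_index + 1) 1).foldl
            (fun major_number find_max =>
              if major_number ≤ PySem.List.pyGetD xs find_max 0 then
                PySem.List.pyGetD xs find_max 0
              else major_number) 0]) back_keys) [] := rfl

-- B, with the local `let`s zeta-reduced (definitional unfolding only)
theorem pvB_shape (xs : List Int) : transform_alt xs =
    (PySem.List.pyRange 0 xs.length 1).foldl (fun out length =>
      ((PySem.List.pyRange 0 xs.length 1).foldl (fun rows start =>
          rows ++ [((PySem.List.slice xs (some start) none).foldl
            (fun (st : Int × List Int) value =>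
              (if st.1 < value then value else st.1,
               st.2 ++ [if st.1 < value then value else st.1])) (0, ([] : List Int))).2])
        []).foldl (fun out2 row =>
          if length < (row.length : Int) then out2 ++ [PySem.List.pyGetD row length 0] else out2)
        out) [] := rfl

-- A's innermost loop over range(s, (o+s)+1) is the window max over xs[s..s+o], init m
theorem pvA_entry (xs : List Int) (s : Nat) : ∀ (l : Nat), s + l < xs.length → ∀ (m : Int),
    (PySem.List.pyRange (s : Int) ((l : Int) + (s : Int) + 1) 1).foldl
      (fun major_number find_max =>
        if major_number ≤ PySem.List.pyGetD xs find_max 0 then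
          PySem.List.pyGetD xs find_max 0
        else major_number) m
    = ((xs.drop s).take (l + 1)).foldl max m := by
  intro l
  induction l with
  | zero =>
    intro hsl m
    have hs : s < xs.length := by omega
    have h1 : (((0 : Nat) : Int) + (s : Int) + 1) = (s : Int) + 1 := by push_cast; ring
    rw [h1, PySem.List.pyRange_one_singleton]
    have hdrop : xs.drop s = xs[s] :: xs.drop (s + 1) := List.drop_eq_getElem_cons hs
    have hg : PySem.List.pyGetD xs (s : Int) 0 = xs[s] := by
      rw [PySem.List.pyGetD_natCast]
      simp [List.getD_eq_getElem?_getD, List.getElem?_eq_getElem hs]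
    rw [hdrop]
    simp only [List.take_succ_cons, List.take_zero, List.foldl_cons, List.foldl_nil, hg]
    omega
  | succ k ih =>
    intro hsl m
    have hk : s + k < xs.length := by omega
    have hsplit : PySem.List.pyRange (s : Int) (((k + 1 : Nat) : Int) + (s : Int) + 1) 1
        = PySem.List.pyRange (s : Int) ((k : Int) + (s : Int) + 1) 1 ++ [(k : Int) + (s : Int) + 1] := by
      have h := PySem.List.pyRange_one_succ_right (a := (s : Int)) (b := (k : Int) + (s : Int) + 1)
        (by omega)
      rw [← h]; congr 1; push_cast; ring
    rw [hsplit, List.foldl_append, ih hk]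
    have hx : s + k + 1 < xs.length := by omega
    have hg : PySem.List.pyGetD xs ((k : Int) + (s : Int) + 1) 0 = xs[s + k + 1] := by
      have h1 : ((k : Int) + (s : Int) + 1) = ((s + k + 1 : Nat) : Int) := by push_cast; ring
      rw [h1, PySem.List.pyGetD_natCast]
      simp [List.getD_eq_getElem?_getD, List.getElem?_eq_getElem hx]
    have hlen : k + 1 < (xs.drop s).length := by simp; omega
    have htake : (xs.drop s).take (k + 1 + 1)
        = (xs.drop s).take (k + 1) ++ [(xs.drop s)[k + 1]'hlen] := by
      rw [List.take_add_one]
      simp [List.getElem?_eq_getElem hlen]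
    have hdg : (xs.drop s)[k + 1]'hlen = xs[s + k + 1] := by
      rw [List.getElem_drop]
      simp only [Nat.add_assoc]
    rw [htake, List.foldl_append, hdg]
    simp only [List.foldl_cons, List.foldl_nil, hg]
    omega

-- filter of range n by (· < k), for k ≤ n
theorem pvRange_filter (k : Nat) : ∀ (n : Nat), k ≤ n →
    (List.range n).filter (fun s => decide (s < k)) = List.range k := by
  intro n
  induction n with
  | zero =>
    intro hk
    have hk0 : k = 0 := Nat.le_zero.mp hk
    subst hk0
    rfl
  | succ m ih =>
    intro hk
    rw [List.range_succ, List.filter_append]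
    rcases Nat.lt_or_ge m k with h | h
    · have hk1 : k = m + 1 := by omega
      subst hk1
      have hf : (List.range m).filter (fun s => decide (s < m + 1)) = List.range m :=
        List.filter_eq_self.mpr (fun a ha => by
          have := List.mem_range.mp ha
          simp
          omega)
      rw [hf, List.range_succ]
      simp
    · rw [ih h]
      have hnil : (List.filter (fun s => decide (s < k)) [m]) = [] := by
        simp
        omega
      rw [hnil, List.append_nil]

-- A equals the canonical form
theorem pvA_eq (xs : List Int) : transform xs = pvC xs := by
  rw [pvA_shape]
  simp only [PySem.List.foldl_append_singleton_eq_map, PySem.List.foldl_append_eq_flatMap,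
    List.nil_append]
  rw [PySem.List.pyRange_zero_nat, List.flatMap_map]
  unfold pvC
  apply List.flatMap_congr
  intro o ho
  have hon : o < xs.length := List.mem_range.mp ho
  try simp only [Function.comp_apply]
  have h1 : ((xs.length : Int) - (o : Int)) = ((xs.length - o : Nat) : Int) := by
    push_cast [Nat.cast_sub (le_of_lt hon)]; ring
  rw [h1, PySem.List.pyRange_zero_nat, List.map_map]
  apply List.map_congr_left
  intro s hs
  have hsn : s < xs.length - o := List.mem_range.mp hs
  try simp only [Function.comp_apply]
  exact pvA_entry xs s o (by omega) 0

-- gather inner loop of Source B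
theorem pvGather (rows : List (List Int)) (L : Int) : ∀ (acc : List Int),
    rows.foldl (fun out2 row =>
      if L < (row.length : Int) then out2 ++ [PySem.List.pyGetD row L 0] else out2) acc
    = acc ++ (rows.filter (fun row => decide (L < (row.length : Int)))).map
        (fun row => PySem.List.pyGetD row L 0) := by
  induction rows with
  | nil => intro acc; simp
  | cons r t ih =>
    intro acc
    by_cases h : L < (r.length : Int) <;> simp [List.foldl, h, ih]

-- B equals the canonical form
theorem pvB_eq (xs : List Int) : transform_alt xs = pvC xs := by
  rw [pvB_shape]
  have hrows : (PySem.List.pyRange 0 xs.length 1).foldl (fun rows start =>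
      rows ++ [((PySem.List.slice xs (some start) none).foldl
        (fun (st : Int × List Int) value =>
          (if st.1 < value then value else st.1,
           st.2 ++ [if st.1 < value then value else st.1])) (0, ([] : List Int))).2]) []
      = (List.range xs.length).map (fun s => pvRmx (xs.drop s) 0) := by
    rw [PySem.List.foldl_append_singleton_eq_map, List.nil_append, PySem.List.pyRange_zero_nat,
      List.map_map]
    apply List.map_congr_left
    intro s _
    simp only [Function.comp_apply, PySem.List.slice_from_natCast, pvFold_rmx, List.nil_append]
  rw [hrows]
  simp only [pvGather]
  simp only [PySem.List.foldl_append_eq_flatMap, List.nil_append]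
  rw [PySem.List.pyRange_zero_nat, List.flatMap_map]
  unfold pvC
  apply List.flatMap_congr
  intro l hl
  have hln : l < xs.length := List.mem_range.mp hl
  try simp only [Function.comp_apply]
  rw [List.filter_map]
  have hfc : (List.range xs.length).filter
      ((fun row : List Int => decide ((l : Int) < (row.length : Int))) ∘ (fun s => pvRmx (xs.drop s) 0))
      = (List.range xs.length).filter (fun s => decide (s < xs.length - l)) := by
    apply List.filter_congr
    intro s hs
    have hsn : s < xs.length := List.mem_range.mp hs
    simp only [Function.comp_apply, decide_eq_decide, pvRmx_length, List.length_drop]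
    omega
  rw [hfc, pvRange_filter (xs.length - l) xs.length (by omega), List.map_map]
  apply List.map_congr_left
  intro s hs
  have hsn : s < xs.length - l := List.mem_range.mp hs
  have hl' : l < (xs.drop s).length := by simp; omega
  have hlen : l < (pvRmx (xs.drop s) 0).length := by rw [pvRmx_length]; exact hl'
  try simp only [Function.comp_apply]
  have hg : PySem.List.pyGetD (pvRmx (xs.drop s) 0) (l : Int) 0
      = (pvRmx (xs.drop s) 0)[l]'hlen := by
    rw [PySem.List.pyGetD_natCast]
    simp [List.getD_eq_getElem?_getD, List.getElem?_eq_getElem hlen]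
  rw [hg, pvRmx_getElem (xs.drop s) 0 l hl']
  rfl

-- ===== VERDICT (by name: the statement is the Claim_ definition above) =====
theorem transform_spec : Claim_equal_transform := by
  intro xs _
  unfold Spec_transform
  rw [pvA_eq, pvB_eq]
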